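-- pv_equiv track=rewrite | github.com/ownmy-app/security-scanner | src/security_scanner/agents/diff_analyzer.py | _is_security_sensitive
-- ===== SOURCE A (Python) =====
-- def _is_security_sensitive(fpath: str) -> bool:
--     """Heuristic: is this file likely security-sensitive?"""
--     lower = fpath.lower()
--     sensitive_patterns = [
--         "auth", "login", "session", "token", "credential",
--         "password", "secret", "crypto", "encrypt", "key",
--         "middleware", "guard", "policy", "permission",
--         ".env", "config/database", "config/secrets",
--     ]
--     return any(p in lower for p in sensitive_patterns)
-- ===== SOURCE B (Python) =====
-- def _is_security_sensitive(fpath: str) -> bool: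
--     """Heuristic: is this file likely security-sensitive?"""
--     patterns = ("auth", "login", "session", "token", "credential",
--                 "password", "secret", "crypto", "encrypt", "key",
--                 "middleware", "guard", "policy", "permission",
--                 ".env", "config/database", "config/secrets")
--     s = fpath.lower()
--     while s:
--         if s.startswith(patterns):
--             return True
--         s = s[1:]
--     return False
-- ===== Notes on version B (the rewrite author's own statement) =====
-- stated objective: alternative
-- what changed: B makes one left-to-right scan over suffixes of the lowercased path, testing all keywords at a position at once via tuple-argument str.startswith, instead of A's separate full substring scan per keyword.
import Mathlib
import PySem

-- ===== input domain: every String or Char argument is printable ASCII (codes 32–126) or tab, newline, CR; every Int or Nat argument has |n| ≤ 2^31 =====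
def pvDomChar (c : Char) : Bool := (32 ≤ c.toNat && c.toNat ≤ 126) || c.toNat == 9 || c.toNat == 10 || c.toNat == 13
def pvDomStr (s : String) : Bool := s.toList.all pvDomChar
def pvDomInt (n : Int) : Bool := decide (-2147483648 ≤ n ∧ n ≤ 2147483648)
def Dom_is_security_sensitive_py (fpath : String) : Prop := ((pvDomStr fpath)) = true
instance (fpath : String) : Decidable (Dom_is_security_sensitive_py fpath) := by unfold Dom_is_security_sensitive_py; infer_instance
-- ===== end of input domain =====

-- B replaces A's per-keyword substring scans by one left-to-right scan over suffixes of the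
-- lowercased path, testing all keywords at a position at once; objective: alternative single scan.

def sensitivePatterns : List String :=
  ["auth", "login", "session", "token", "credential",
   "password", "secret", "crypto", "encrypt", "key",
   "middleware", "guard", "policy", "permission",
   ".env", "config/database", "config/secrets"]

-- ===== PORT A =====
def is_security_sensitive_py (fpath : String) : Bool :=
  let lower := PySem.Str.lower fpath
  sensitivePatterns.any (fun p => PySem.Str.isIn p lower)

-- ===== PORT B =====
-- while s: if s.startswith(patterns): return True; s = s[1:]  — structural recursion on the chars
def scanSensitive : List Char → Bool
  | [] => false
  | c :: rest =>
    if sensitivePatterns.any (fun p => PySem.Chars.startswith (c :: rest) p.toList) then true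
    else scanSensitive rest

def is_security_sensitive_py_alt (fpath : String) : Bool :=
  scanSensitive (PySem.Str.lower fpath).toList

-- ===== PRECONDITION & SPEC =====
def Spec_is_security_sensitive_py (fpath : String) (out : Bool) : Prop := out = is_security_sensitive_py_alt fpath
instance (fpath : String) (out : Bool) : Decidable (Spec_is_security_sensitive_py fpath out) := by unfold Spec_is_security_sensitive_py; infer_instance

-- ===== CLAIM (what is proved, stated in full; the proofs are below) =====
def Claim_equal_is_security_sensitive_py : Prop := ∀ (fpath : String), Dom_is_security_sensitive_py fpath → Spec_is_security_sensitive_py fpath (is_security_sensitive_py fpath)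

-- ===== LEMMAS AND PROOFS =====

theorem patterns_nonempty : ∀ p ∈ sensitivePatterns, p.toList ≠ [] := by decide

-- the scan succeeds iff some pattern starts at some position
theorem scan_iff (s : List Char) :
    scanSensitive s = true ↔
      ∃ j, ∃ p ∈ sensitivePatterns, PySem.Chars.startswith (s.drop j) p.toList = true := by
  induction s with
  | nil =>
    simp only [scanSensitive, List.drop_nil]
    constructor
    · intro h; cases h
    · rintro ⟨j, p, hp, hsw⟩
      exact absurd (List.prefix_nil.mp ((PySem.Chars.startswith_iff _ _).mp hsw))
        (patterns_nonempty p hp)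
  | cons c rest ih =>
    simp only [scanSensitive]
    split_ifs with h
    · simp only [true_iff]
      rcases List.any_eq_true.mp h with ⟨p, hp, hsw⟩
      exact ⟨0, p, hp, by simpa using hsw⟩
    · rw [ih]
      constructor
      · rintro ⟨j, p, hp, hsw⟩
        exact ⟨j + 1, p, hp, by simpa using hsw⟩
      · rintro ⟨j, p, hp, hsw⟩
        cases j with
        | zero =>
          exact absurd (List.any_eq_true.mpr ⟨p, hp, by simpa using hsw⟩) h
        | succ k =>
          exact ⟨k, p, hp, by simpa using hsw⟩

theorem ports_agree (fpath : String) :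
    is_security_sensitive_py fpath = is_security_sensitive_py_alt fpath := by
  unfold is_security_sensitive_py is_security_sensitive_py_alt
  rw [Bool.eq_iff_iff, scan_iff]
  simp only [List.any_eq_true, PySem.Str.isIn_iff_infix]
  constructor
  · rintro ⟨p, hp, hinf⟩
    have : PySem.Chars.isIn p.toList (PySem.Str.lower fpath).toList = true :=
      (PySem.Chars.isIn_iff_infix _ _).mpr hinf
    rcases (PySem.Chars.exists_prefix_drop_iff_isIn _ _).mpr this with ⟨j, hpre⟩
    exact ⟨j, p, hp, (PySem.Chars.startswith_iff _ _).mpr hpre⟩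
  · rintro ⟨j, p, hp, hsw⟩
    refine ⟨p, hp, ?_⟩
    rw [← PySem.Chars.isIn_iff_infix]
    exact (PySem.Chars.exists_prefix_drop_iff_isIn _ _).mp
      ⟨j, (PySem.Chars.startswith_iff _ _).mp hsw⟩

-- ===== VERDICT (by name: the statement is the Claim_ definition above) =====
theorem is_security_sensitive_py_spec : Claim_equal_is_security_sensitive_py := by
  intro fpath _
  exact ports_agree fpath
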